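-- pv_equiv track=rewrite | github.com/akimboio/django-narrative | narrative/batteries/uptime.py | detect_temporal_clusters
-- ===== SOURCE A (Python) =====
-- def detect_temporal_clusters(time_list):
--     """
--     Break the times in the time_list into a series of clusters based
--     on changes in the median interval between times.
--
--     The ideas is that we look at the intervals between elements in the
--     list, take the median interval, then tweat any interval much bigger
--     than that as indicating the start of a new cluster.
--
--     Note: assumes that time_list is sorted in ascending order.
--     """
--     time_list_len = len(time_list)
--
--     if time_list_len > 0:
--         interval_list = [time_list[idx] - time_list[idx - 1] for idx in range(1, time_list_len)]
--         interval_list_len = len(interval_list)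
--
--         new_cluster_threshold = interval_list[int(interval_list_len / 2)]
--
--         clusters = [[time_list[0]]]
--
--         for idx in range(1, time_list_len):
--             if interval_list[idx-1] > new_cluster_threshold:
--                 # The interval past is too much; start a new cluster
--                 clusters.append([time_list[idx]])
--             else:
--                 # This time was close enough to the last one to be in
--                 # in the same cluster
--                 clusters[-1].append(time_list[idx])
--
--         return clusters, new_cluster_threshold
--     return [], 0
-- ===== SOURCE B (Python) =====
-- def detect_temporal_clusters(time_list):
--     """
--     Break time_list into clusters: the median interval is the threshold,
--     and any interval strictly larger than it starts a new cluster.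
--     Assumes time_list is sorted ascending.
--     """
--     if not time_list:
--         return [], 0
--     intervals = [b - a for a, b in zip(time_list, time_list[1:])]
--     threshold = intervals[len(intervals) // 2]
--     breaks = [0] + [i for i in range(1, len(time_list)) if intervals[i - 1] > threshold] + [len(time_list)]
--     clusters = [time_list[a:b] for a, b in zip(breaks, breaks[1:])]
--     return clusters, threshold
-- ===== Notes on version B (the rewrite author's own statement) =====
-- stated objective: alternative
-- what changed: A grows clusters imperatively in one pass, appending each time either as a new singleton cluster or onto the last cluster; B instead computes the list of break indices (where the interval exceeds the median) and builds the clusters by slicing time_list between consecutive breakpoints.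
import Mathlib
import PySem

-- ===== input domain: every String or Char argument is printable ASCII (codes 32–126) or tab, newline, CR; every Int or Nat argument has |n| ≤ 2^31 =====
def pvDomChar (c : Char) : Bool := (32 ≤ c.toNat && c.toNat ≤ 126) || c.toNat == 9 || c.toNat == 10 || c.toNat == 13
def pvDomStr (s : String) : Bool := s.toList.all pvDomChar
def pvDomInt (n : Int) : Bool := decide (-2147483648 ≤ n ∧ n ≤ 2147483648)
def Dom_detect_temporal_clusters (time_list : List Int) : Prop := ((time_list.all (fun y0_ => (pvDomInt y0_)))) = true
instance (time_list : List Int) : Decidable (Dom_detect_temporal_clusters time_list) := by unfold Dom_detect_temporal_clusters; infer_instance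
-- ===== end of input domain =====

-- B replaces A's imperative one-pass cluster growing by breakpoint-finding and slicing; alternative decomposition, same cost.


-- ===== PORT A =====
-- clusters[-1].append(x): append x to the last cluster (clusters is never empty in A)
def pvAppendLast (cl : List (List Int)) (x : Int) : List (List Int) :=
  match cl with
  | [] => []
  | [l] => [l ++ [x]]
  | l :: ls => l :: pvAppendLast ls x

def detect_temporal_clusters (time_list : List Int) : List (List Int) × Int :=
  let n : Int := PySem.List.len time_list
  if n > 0 then
    let interval_list : List Int :=
      (PySem.List.pyRange 1 n 1).map (fun idx =>
        PySem.List.pyGetD time_list idx 0 - PySem.List.pyGetD time_list (idx - 1) 0)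
    -- int(interval_list_len / 2) on a nonnegative length is Nat division by 2
    let new_cluster_threshold : Int :=
      PySem.List.pyGetD interval_list ((interval_list.length / 2 : Nat) : Int) 0
    let clusters : List (List Int) := [[PySem.List.pyGetD time_list 0 0]]
    let clusters := (PySem.List.pyRange 1 n 1).foldl
      (fun cl idx =>
        if PySem.List.pyGetD interval_list (idx - 1) 0 > new_cluster_threshold then
          cl ++ [[PySem.List.pyGetD time_list idx 0]]
        else
          pvAppendLast cl (PySem.List.pyGetD time_list idx 0)) clusters
    (clusters, new_cluster_threshold)
  else ([], 0)

-- ===== PORT B =====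
def detect_temporal_clusters_alt (time_list : List Int) : List (List Int) × Int :=
  if time_list = [] then ([], 0) else
    let intervals : List Int :=
      (time_list.zip (PySem.List.slice time_list (some 1) none)).map (fun p => p.2 - p.1)
    let threshold : Int :=
      PySem.List.pyGetD intervals ((intervals.length / 2 : Nat) : Int) 0
    let n : Int := PySem.List.len time_list
    let breaks : List Int :=
      (0 :: (PySem.List.pyRange 1 n 1).filter
        (fun i => decide (PySem.List.pyGetD intervals (i - 1) 0 > threshold))) ++ [n]
    let clusters : List (List Int) :=
      (breaks.zip (breaks.drop 1)).map
        (fun p => PySem.List.slice time_list (some p.1) (some p.2))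
    (clusters, threshold)

-- ===== PRECONDITION & SPEC =====
-- Pre_ excludes exactly the singleton lists: there interval_list is empty and A raises IndexError.
def Pre_detect_temporal_clusters (time_list : List Int) : Prop :=
  time_list = [] ∨ 2 ≤ time_list.length
instance (time_list : List Int) : Decidable (Pre_detect_temporal_clusters time_list) := by
  unfold Pre_detect_temporal_clusters; infer_instance

def pvWitness_detect_temporal_clusters : List Int := [0, 1, 2, 10, 11]

def Spec_detect_temporal_clusters (time_list : List Int) (out : List (List Int) × Int) : Prop := out = detect_temporal_clusters_alt time_list
instance (time_list : List Int) (out : List (List Int) × Int) : Decidable (Spec_detect_temporal_clusters time_list out) := by unfold Spec_detect_temporal_clusters; infer_instance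

-- ===== CLAIM (what is proved, stated in full; the proofs are below) =====
def Claim_equal_detect_temporal_clusters : Prop := ∀ (time_list : List Int), Dom_detect_temporal_clusters time_list → Pre_detect_temporal_clusters time_list → Spec_detect_temporal_clusters time_list (detect_temporal_clusters time_list)

-- ===== LEMMAS AND PROOFS =====

-- slices of tl between consecutive boundaries of a boundary list
def pvSegs (tl : List Int) : List Int → List (List Int)
  | a :: b :: rest => PySem.List.slice tl (some a) (some b) :: pvSegs tl (b :: rest)
  | _ => []

lemma zip_map_eq_pvSegs (tl : List Int) :
    ∀ bs : List Int,
      (bs.zip (bs.drop 1)).map (fun p => PySem.List.slice tl (some p.1) (some p.2))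
        = pvSegs tl bs := by
  intro bs
  induction bs with
  | nil => simp [pvSegs]
  | cons x rest ih =>
    cases rest with
    | nil => simp [pvSegs]
    | cons y r => simp [pvSegs, ← ih]

lemma pvSegs_append_two (tl : List Int) :
    ∀ (l : List Int) (a b : Int),
      pvSegs tl ((l ++ [a]) ++ [b]) = pvSegs tl (l ++ [a]) ++ [PySem.List.slice tl (some a) (some b)] := by
  intro l
  induction l with
  | nil => intro a b; simp [pvSegs]
  | cons x l ih =>
    intro a b
    cases l with
    | nil => simp [pvSegs]
    | cons y r => simpa [pvSegs] using ih a b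

lemma pvAppendLast_append_singleton (x : Int) :
    ∀ (X : List (List Int)) (s : List Int),
      pvAppendLast (X ++ [s]) x = X ++ [s ++ [x]] := by
  intro X
  induction X with
  | nil => intro s; simp [pvAppendLast]
  | cons y X ih =>
    intro s
    cases X with
    | nil => simp [pvAppendLast]
    | cons z r => simpa [pvAppendLast] using ih s

-- extending a slice by the next element
lemma slice_snoc (tl : List Int) (a : Int) (k : Nat)
    (ha : 0 ≤ a) (hak : a ≤ (k : Int)) (hk : k < tl.length) :
    PySem.List.slice tl (some a) (some (k : Int)) ++ [tl.getD k 0]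
      = PySem.List.slice tl (some a) (some ((k : Int) + 1)) := by
  have h1 : PySem.List.slice tl (some a) (some (k : Int))
      = (tl.drop a.toNat).take (k - a.toNat) := by
    rw [PySem.List.slice_toNat tl ha (by positivity)]
    have e : ((k : Int)).toNat = k := by omega
    rw [e]
  have h2 : PySem.List.slice tl (some a) (some ((k : Int) + 1))
      = (tl.drop a.toNat).take (k + 1 - a.toNat) := by
    rw [PySem.List.slice_toNat tl ha (by positivity)]
    have e : ((k : Int) + 1).toNat = k + 1 := by omega
    rw [e]
  rw [h1, h2]
  have hsub : k + 1 - a.toNat = (k - a.toNat) + 1 := by omega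
  rw [hsub, List.take_add_one]
  have hget : (tl.drop a.toNat)[k - a.toNat]? = some (tl.getD k 0) := by
    rw [List.getElem?_drop]
    have hx : a.toNat + (k - a.toNat) = k := by omega
    rw [hx, List.getElem?_eq_getElem hk, List.getD_eq_getElem tl 0 hk]
  rw [hget]
  rfl

lemma slice_singleton (tl : List Int) (k : Nat) (hk : k < tl.length) :
    PySem.List.slice tl (some (k : Int)) (some ((k : Int) + 1)) = [tl.getD k 0] := by
  rw [← slice_snoc tl (k : Int) k (by positivity) le_rfl hk]
  have h0 : PySem.List.slice tl (some (k : Int)) (some (k : Int)) = [] := by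
    rw [PySem.List.slice_toNat tl (by positivity) (by positivity)]
    simp
  simp [h0]

-- main loop invariant: A's fold over range(1, k) produces the slices between breakpoints
lemma fold_eq_pvSegs (tl : List Int) (q : Int → Prop) [DecidablePred q] :
    ∀ k : Nat, 1 ≤ k → k ≤ tl.length →
      (PySem.List.pyRange 1 (k : Int) 1).foldl
        (fun cl idx =>
          if q idx then cl ++ [[PySem.List.pyGetD tl idx 0]]
          else pvAppendLast cl (PySem.List.pyGetD tl idx 0))
        [[PySem.List.pyGetD tl 0 0]]
      = pvSegs tl ((0 :: (PySem.List.pyRange 1 (k : Int) 1).filter (fun i => decide (q i))) ++ [(k : Int)]) := by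
  intro k
  induction k with
  | zero => intro h; omega
  | succ k ih =>
    intro _ hlen
    by_cases hk1 : 1 ≤ k
    · -- k ≥ 1: peel the last index k off the range
      have hrange : PySem.List.pyRange 1 ((k : Int) + 1) 1
          = PySem.List.pyRange 1 (k : Int) 1 ++ [(k : Int)] :=
        PySem.List.pyRange_one_succ_right (by exact_mod_cast hk1)
      have hcast : ((k + 1 : Nat) : Int) = (k : Int) + 1 := by push_cast; ring
      have ihk := ih hk1 (by omega)
      rw [hcast, hrange, List.foldl_append, ihk, List.filter_append]
      simp only [List.foldl_cons, List.foldl_nil]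
      by_cases hq : q (k : Int)
      · -- break at k: a new singleton cluster and a new boundary k
        have hf : (List.filter (fun i => decide (q i)) [(k : Int)]) = [(k : Int)] := by
          simp [hq]
        rw [if_pos hq, hf, ← List.cons_append,
          pvSegs_append_two tl _ ((k : Int)) ((k : Int) + 1)]
        rw [slice_singleton tl k (by omega)]
        rw [PySem.List.pyGetD_natCast]
      · -- no break at k: the last cluster / last slice is extended by tl[k]
        have hf : (List.filter (fun i => decide (q i)) [(k : Int)]) = [] := by
          simp [hq]
        rw [if_neg hq, hf, List.append_nil]
        obtain ⟨m, a, hma⟩ : ∃ m a,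
            (0 :: (PySem.List.pyRange 1 (k : Int) 1).filter (fun i => decide (q i)) : List Int)
              = m ++ [a] := by
          refine ⟨_, _, (List.dropLast_append_getLast (l := _) (by simp)).symm⟩
        have ha_mem : a ∈ (0 :: (PySem.List.pyRange 1 (k : Int) 1).filter (fun i => decide (q i)) : List Int) := by
          rw [hma]; simp
        have ha_bounds : 0 ≤ a ∧ a ≤ (k : Int) := by
          rcases List.mem_cons.1 ha_mem with h0 | hmem
          · omega
          · have := (PySem.List.mem_pyRange_one).1 (List.mem_of_mem_filter hmem)
            omega
        rw [hma, pvSegs_append_two tl m a ((k : Int)), pvSegs_append_two tl m a ((k : Int) + 1)]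
        rw [pvAppendLast_append_singleton]
        have hs := slice_snoc tl a k ha_bounds.1 ha_bounds.2 (by omega)
        rw [PySem.List.pyGetD_natCast]
        simp only [List.getD] at hs ⊢
        rw [hs]
    · -- k + 1 = 1: the range is empty and there is a single cluster [tl[0]]
      have hk0 : k = 0 := by omega
      subst hk0
      have h0 : PySem.List.pyRange 1 ((0 + 1 : Nat) : Int) 1 = [] := by
        apply PySem.List.pyRange_one_eq_nil; norm_num
      rw [h0]
      simp only [List.foldl_nil, List.filter_nil]
      obtain ⟨t, r, htl⟩ : ∃ t r, tl = t :: r := by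
        cases tl with
        | nil => simp at hlen
        | cons t r => exact ⟨t, r, rfl⟩
      subst htl
      have hs : PySem.List.slice (t :: r) (some 0) (some ((0 + 1 : Nat) : Int)) = [t] := by
        rw [PySem.List.slice_toNat _ le_rfl (by positivity)]
        simp
      simp [pvSegs, PySem.List.pyGetD_zero_cons, PySem.List.slice_to]

-- the two interval lists coincide
lemma intervals_eq (tl : List Int) :
    (PySem.List.pyRange 1 (tl.length : Int) 1).map (fun idx =>
        PySem.List.pyGetD tl idx 0 - PySem.List.pyGetD tl (idx - 1) 0)
      = (tl.zip (PySem.List.slice tl (some 1) none)).map (fun p => p.2 - p.1) := by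
  rw [PySem.List.slice_from_one]
  apply List.ext_getElem
  · simp [PySem.List.length_pyRange_one, List.length_tail]
  · intro k hk1 hk2
    have hk : k < tl.length - 1 := by
      simpa [PySem.List.length_pyRange_one] using hk1
    simp only [List.getElem_map, PySem.List.getElem_pyRange_one, List.getElem_zip,
      List.getElem_tail]
    rw [show (1 : Int) + (k : Int) = ((k + 1 : Nat) : Int) by push_cast; ring]
    rw [show ((k + 1 : Nat) : Int) - 1 = ((k : Nat) : Int) by push_cast; ring]
    rw [PySem.List.pyGetD_natCast, PySem.List.pyGetD_natCast]
    rw [List.getD_eq_getElem tl 0 (by omega), List.getD_eq_getElem tl 0 (by omega)]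

-- ===== VERDICT (by name: the statement is the Claim_ definition above) =====
theorem detect_temporal_clusters_spec : Claim_equal_detect_temporal_clusters := by
  intro tl _ hpre
  unfold Spec_detect_temporal_clusters
  unfold detect_temporal_clusters detect_temporal_clusters_alt
  rcases hpre with hnil | hlen
  · subst hnil; simp [PySem.List.len]
  · have htlne : tl ≠ [] := by intro h; subst h; simp at hlen
    have hn : PySem.List.len tl = (tl.length : Int) := by simp
    simp only [hn, if_neg htlne]
    have hpos : ((tl.length : Int) > 0) := by exact_mod_cast Nat.lt_of_lt_of_le (by omega) hlen
    rw [if_pos hpos]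
    rw [intervals_eq tl]
    rw [fold_eq_pvSegs tl
      (fun idx => PySem.List.pyGetD ((tl.zip (PySem.List.slice tl (some 1) none)).map (fun p => p.2 - p.1)) (idx - 1) 0 >
        PySem.List.pyGetD ((tl.zip (PySem.List.slice tl (some 1) none)).map (fun p => p.2 - p.1))
          ((((tl.zip (PySem.List.slice tl (some 1) none)).map (fun p => p.2 - p.1)).length / 2 : Nat) : Int) 0)
      tl.length (by omega) le_rfl]
    rw [zip_map_eq_pvSegs tl]
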